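-- pv_equiv track=rewrite | github.com/stepochkin/ml_common | lib/stepin/ml/meta_train.py | _three_dict_product
-- ===== SOURCE A (Python) =====
-- from itertools import product
--
-- def _three_dict_product(d1, d2, d3):
--     keys1 = d1.keys()
--     keys2 = d2.keys()
--     keys3 = d3.keys()
--     for values in product(*tuple(d1[k] for k in keys1)):
--         for values2 in product(*tuple(d2[k] for k in keys2)):
--             for values3 in product(*tuple(d3[k] for k in keys3)):
--                 yield dict(zip(keys1, values)), dict(zip(keys2, values2)), dict(zip(keys3, values3))
-- ===== SOURCE B (Python) =====
-- from itertools import product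
--
-- def _three_dict_product(d1, d2, d3):
--     # Precompute, for each dict, the table of all its value-assignment dicts by
--     # incremental extension (a fold over the keys), then one flat product.
--     def combos(d):
--         tables = [{}]
--         for k, vals in d.items():
--             tables = [{**t, k: v} for t in tables for v in vals]
--         return tables
--     c1, c2, c3 = combos(d1), combos(d2), combos(d3)
--     for a, b, c in product(c1, c2, c3):
--         yield dict(a), dict(b), dict(c)
-- ===== Notes on version B (the rewrite author's own statement) =====
-- stated objective: alternative
-- what changed: B precomputes for each dict the table of all its value-assignment dicts by incrementally extending partial dicts key by key (a fold), then takes one flat product over the three tables, instead of A's three nested loops that recompute the inner itertools.product of value tuples and zip them with the keys on every iteration.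
import Mathlib
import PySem

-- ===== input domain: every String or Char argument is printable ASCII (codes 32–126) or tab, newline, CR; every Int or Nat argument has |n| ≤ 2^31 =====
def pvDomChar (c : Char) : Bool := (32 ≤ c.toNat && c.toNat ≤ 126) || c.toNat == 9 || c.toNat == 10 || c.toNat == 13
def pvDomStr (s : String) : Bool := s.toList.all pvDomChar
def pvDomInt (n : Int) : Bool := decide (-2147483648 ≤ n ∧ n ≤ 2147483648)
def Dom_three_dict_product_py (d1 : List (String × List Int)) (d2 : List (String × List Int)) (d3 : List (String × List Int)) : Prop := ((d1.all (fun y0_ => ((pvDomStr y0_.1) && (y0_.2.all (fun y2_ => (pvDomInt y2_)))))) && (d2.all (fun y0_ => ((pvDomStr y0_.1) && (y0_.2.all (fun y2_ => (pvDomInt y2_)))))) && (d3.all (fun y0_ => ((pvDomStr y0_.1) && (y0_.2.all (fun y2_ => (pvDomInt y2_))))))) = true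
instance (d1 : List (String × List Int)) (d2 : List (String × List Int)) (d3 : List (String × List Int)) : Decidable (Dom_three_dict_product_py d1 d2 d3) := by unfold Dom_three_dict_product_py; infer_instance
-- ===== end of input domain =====

-- B replaces A's three nested loops (which recompute the inner itertools.product
-- tuples and zip them with the keys at every yield) by three precomputed tables of
-- value-assignment dicts, built by incrementally extending partial dicts key by key,
-- followed by one flat product; same return values (A and B both yield fresh dicts).

-- ===== PORT A =====
-- itertools.product(*lists): first list varies slowest, [[]] for no lists
def pyProduct : List (List Int) → List (List Int)
  | [] => [[]]
  | l :: ls => l.flatMap (fun v => (pyProduct ls).map (fun vs => v :: vs))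

-- d[k]: first-match lookup in the association list (total here: only called on keys of d)
def pyLookupD (d : List (String × List Int)) (k : String) : List Int :=
  ((d.find? (fun p => p.1 == k)).map Prod.snd).getD []

def three_dict_product_py (d1 : List (String × List Int)) (d2 : List (String × List Int)) (d3 : List (String × List Int)) : List ((List (String × Int)) × (List (String × Int)) × (List (String × Int))) :=
  let ks1 := d1.map Prod.fst
  let ks2 := d2.map Prod.fst
  let ks3 := d3.map Prod.fst
  (pyProduct (ks1.map (pyLookupD d1))).flatMap (fun v1 =>
    (pyProduct (ks2.map (pyLookupD d2))).flatMap (fun v2 =>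
      (pyProduct (ks3.map (pyLookupD d3))).map (fun v3 =>
        (ks1.zip v1, ks2.zip v2, ks3.zip v3))))

-- ===== PORT B =====
-- {**t, k: v}: overwrite in place if k is already a key of t, else append
def pyExtend (t : List (String × Int)) (k : String) (v : Int) : List (String × Int) :=
  if t.any (fun p => p.1 == k) then t.map (fun p => if p.1 == k then (k, v) else p)
  else t ++ [(k, v)]

-- combos(d): fold over d.items(), extending every partial dict by every value of the key
def pyTables (d : List (String × List Int)) : List (List (String × Int)) :=
  d.foldl (fun ts kv => ts.flatMap (fun t => kv.2.map (fun v => pyExtend t kv.1 v))) [[]]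

def three_dict_product_py_alt (d1 : List (String × List Int)) (d2 : List (String × List Int)) (d3 : List (String × List Int)) : List ((List (String × Int)) × (List (String × Int)) × (List (String × Int))) :=
  let c1 := pyTables d1
  let c2 := pyTables d2
  let c3 := pyTables d3
  c1.flatMap (fun a => c2.flatMap (fun b => c3.map (fun c => (a, b, c))))

-- ===== PRECONDITION & SPEC =====
-- Pre_ excludes association lists with duplicate keys: those never arise from a Python
-- dict argument, and which of the clashing entries a list model keeps is accidental.
def Pre_three_dict_product_py (d1 : List (String × List Int)) (d2 : List (String × List Int)) (d3 : List (String × List Int)) : Prop :=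
  (d1.map Prod.fst).Nodup ∧ (d2.map Prod.fst).Nodup ∧ (d3.map Prod.fst).Nodup
instance (d1 : List (String × List Int)) (d2 : List (String × List Int)) (d3 : List (String × List Int)) : Decidable (Pre_three_dict_product_py d1 d2 d3) := by unfold Pre_three_dict_product_py; infer_instance

def pvWitness_three_dict_product_py : (List (String × List Int)) × (List (String × List Int)) × (List (String × List Int)) :=
  ([("a", [1, 2])], [("b", [3]), ("c", [4, 5])], [])

def Spec_three_dict_product_py (d1 : List (String × List Int)) (d2 : List (String × List Int)) (d3 : List (String × List Int)) (out : List ((List (String × Int)) × (List (String × Int)) × (List (String × Int)))) : Prop := out = three_dict_product_py_alt d1 d2 d3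
instance (d1 : List (String × List Int)) (d2 : List (String × List Int)) (d3 : List (String × List Int)) (out : List ((List (String × Int)) × (List (String × Int)) × (List (String × Int)))) : Decidable (Spec_three_dict_product_py d1 d2 d3 out) := by unfold Spec_three_dict_product_py; infer_instance

-- ===== CLAIM (what is proved, stated in full; the proofs are below) =====
def Claim_equal_three_dict_product_py : Prop := ∀ (d1 : List (String × List Int)) (d2 : List (String × List Int)) (d3 : List (String × List Int)), Dom_three_dict_product_py d1 d2 d3 → Pre_three_dict_product_py d1 d2 d3 → Spec_three_dict_product_py d1 d2 d3 (three_dict_product_py d1 d2 d3)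

-- ===== LEMMAS AND PROOFS =====

-- With nodup keys, looking up each key in order recovers the value column.
theorem map_pyLookupD (d : List (String × List Int)) (h : (d.map Prod.fst).Nodup) :
    (d.map Prod.fst).map (pyLookupD d) = d.map Prod.snd := by
  induction d with
  | nil => rfl
  | cons kv rest ih =>
    obtain ⟨k, v⟩ := kv
    simp only [List.map_cons, List.nodup_cons] at h
    simp only [List.map_cons, List.cons.injEq]
    constructor
    · simp [pyLookupD]
    · have hrest : (rest.map Prod.fst).map (pyLookupD rest) = rest.map Prod.snd := ih h.2
      rw [← hrest]
      apply List.map_congr_left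
      intro k' hk'
      have hne : ¬ (k = k') := fun he => h.1 (he ▸ hk')
      have hb : (k == k') = false := by simp [hne]
      simp [pyLookupD, List.find?, hb]

theorem pyExtend_notMem (t : List (String × Int)) (k : String) (v : Int)
    (h : k ∉ t.map Prod.fst) : pyExtend t k v = t ++ [(k, v)] := by
  have : t.any (fun p => p.1 == k) = false := by
    simp only [List.any_eq_false, beq_iff_eq]
    intro p hp he
    exact h (he ▸ List.mem_map_of_mem hp)
  simp [pyExtend, this]

-- Characterisation of the table-building fold, for any start list of partial dicts
-- whose keys avoid the remaining keys.
theorem pyTables_fold (d : List (String × List Int)) (ts : List (List (String × Int)))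
    (hnd : (d.map Prod.fst).Nodup)
    (hdisj : ∀ t ∈ ts, ∀ k ∈ d.map Prod.fst, k ∉ t.map Prod.fst) :
    d.foldl (fun ts kv => ts.flatMap (fun t => kv.2.map (fun v => pyExtend t kv.1 v))) ts
      = ts.flatMap (fun t => (pyProduct (d.map Prod.snd)).map (fun vs => t ++ (d.map Prod.fst).zip vs)) := by
  induction d generalizing ts with
  | nil => simp [pyProduct]
  | cons kv rest ih =>
    obtain ⟨k, vals⟩ := kv
    simp only [List.map_cons, List.nodup_cons] at hnd
    have hstep : (ts.flatMap (fun t => vals.map (fun v => pyExtend t k v)))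
        = ts.flatMap (fun t => vals.map (fun v => t ++ [(k, v)])) := by
      apply List.flatMap_congr
      intro t ht
      apply List.map_congr_left
      intro v _
      exact pyExtend_notMem t k v (hdisj t ht k (by simp))
    rw [List.foldl_cons]
    rw [hstep]
    rw [ih _ hnd.2 ?hd]
    case hd =>
      intro t' ht' k' hk'
      simp only [List.mem_flatMap, List.mem_map] at ht'
      obtain ⟨t, ht, v, _, rfl⟩ := ht'
      simp only [List.map_append, List.mem_append, List.map_cons, List.map_nil, List.mem_singleton]
      rintro (h1 | h1)
      · exact hdisj t ht k' (by simp only [List.map_cons, List.mem_cons]; exact Or.inr hk') h1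
      · have hk : k' = k := by simpa using h1
        exact hnd.1 (hk ▸ hk')
    rw [List.flatMap_assoc]
    simp only [pyProduct, List.map_cons]
    apply List.flatMap_congr
    intro t _
    simp [List.flatMap_map, List.map_flatMap, List.map_map, Function.comp_def,
      List.append_assoc]

theorem pyTables_eq (d : List (String × List Int)) (h : (d.map Prod.fst).Nodup) :
    pyTables d = (pyProduct ((d.map Prod.fst).map (pyLookupD d))).map (fun vs => (d.map Prod.fst).zip vs) := by
  rw [map_pyLookupD d h]
  unfold pyTables
  rw [pyTables_fold d [[]] h (by simp)]
  simp

-- ===== VERDICT (by name: the statement is the Claim_ definition above) =====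
theorem three_dict_product_py_spec : Claim_equal_three_dict_product_py := by
  intro d1 d2 d3 _ hpre
  obtain ⟨h1, h2, h3⟩ := hpre
  unfold Spec_three_dict_product_py three_dict_product_py three_dict_product_py_alt
  rw [pyTables_eq d1 h1, pyTables_eq d2 h2, pyTables_eq d3 h3]
  simp [List.flatMap_map, List.map_map, Function.comp_def]
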